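-- pv_equiv track=rewrite | github.com/joyzhang14-14/legacy-notes-digitizer | src/orientation.py | parse_pages_arg
-- ===== SOURCE A (Python) =====
-- def parse_pages_arg(pages_str: str, total: int) -> list[int]:
--     """解析 --pages 参数，返回 1-based 页码列表。支持 "1-5" / "2,4,6" / "3"。"""
--     result = set()
--     for part in pages_str.split(","):
--         part = part.strip()
--         if "-" in part:
--             lo, hi = part.split("-", 1)
--             result.update(range(int(lo), int(hi) + 1))
--         else:
--             result.add(int(part))
--     return sorted(p for p in result if 1 <= p <= total)
-- ===== SOURCE B (Python) =====
-- def parse_pages_arg(pages_str: str, total: int) -> list[int]: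
--     """解析 --pages 参数，返回 1-based 页码列表。支持 "1-5" / "2,4,6" / "3"。"""
--     intervals = []
--     for part in pages_str.split(","):
--         part = part.strip()
--         if "-" in part:
--             lo, hi = part.split("-", 1)
--             lo, hi = int(lo), int(hi)
--         else:
--             lo = hi = int(part)
--         lo = max(lo, 1)
--         hi = min(hi, total)
--         if lo <= hi:
--             intervals.append((lo, hi))
--     intervals.sort(key=lambda iv: iv[0])
--     out = []
--     for lo, hi in intervals:
--         start = max(lo, out[-1] + 1) if out else lo
--         out.extend(range(start, hi + 1))
--     return out
-- ===== Notes on version B (the rewrite author's own statement) =====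
-- stated objective: alternative
-- what changed: B replaces A's global set plus final sort by collecting each token as an interval clamped to [1,total], sorting the intervals by left end, and emitting the deduplicated pages with one merging sweep, so no set is built and ranges are never expanded outside [1,total].
import Mathlib
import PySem

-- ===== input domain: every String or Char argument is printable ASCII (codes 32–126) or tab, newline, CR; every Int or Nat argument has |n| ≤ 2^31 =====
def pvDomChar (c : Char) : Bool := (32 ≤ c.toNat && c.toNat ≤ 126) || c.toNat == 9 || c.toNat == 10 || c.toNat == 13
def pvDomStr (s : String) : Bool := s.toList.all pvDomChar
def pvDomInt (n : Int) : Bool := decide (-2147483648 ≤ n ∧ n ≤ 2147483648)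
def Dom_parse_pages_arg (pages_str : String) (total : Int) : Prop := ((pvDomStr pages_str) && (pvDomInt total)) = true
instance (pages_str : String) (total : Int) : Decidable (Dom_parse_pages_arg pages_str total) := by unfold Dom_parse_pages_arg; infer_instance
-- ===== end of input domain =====

-- B replaces A's global set + final sort by clamped intervals merged with a single sorted sweep,
-- so pages are emitted in order without expanding ranges outside [1, total].

-- ===== PORT A =====
def parse_pages_arg (pages_str : String) (total : Int) : List Int :=
  let result : PySem.Set Int :=
    ((PySem.Str.split? pages_str ",").getD []).foldl (fun result part =>
      let part := PySem.Str.strip part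
      if PySem.Str.isIn "-" part then
        let pieces := (PySem.Str.splitMax? part "-" 1).getD []
        let lo := (PySem.Int.ofStr? (pieces.getD 0 "")).getD 0
        let hi := (PySem.Int.ofStr? (pieces.getD 1 "")).getD 0
        PySem.Set.update result (PySem.List.pyRange lo (hi + 1) 1)
      else
        PySem.Set.add result ((PySem.Int.ofStr? part).getD 0)) PySem.Set.empty
  PySem.List.sorted (result.filter (fun p => decide (1 ≤ p ∧ p ≤ total))) (fun x => x) false

-- ===== PORT B =====
def parse_pages_arg_alt (pages_str : String) (total : Int) : List Int :=
  let intervals : List (Int × Int) :=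
    ((PySem.Str.split? pages_str ",").getD []).foldl (fun acc part =>
      let part := PySem.Str.strip part
      let lohi : Int × Int :=
        if PySem.Str.isIn "-" part then
          let pieces := (PySem.Str.splitMax? part "-" 1).getD []
          ((PySem.Int.ofStr? (pieces.getD 0 "")).getD 0,
           (PySem.Int.ofStr? (pieces.getD 1 "")).getD 0)
        else
          let v := (PySem.Int.ofStr? part).getD 0
          (v, v)
      let lo := max lohi.1 1
      let hi := min lohi.2 total
      if lo ≤ hi then acc ++ [(lo, hi)] else acc) []
  let ivs := PySem.List.sorted intervals (fun iv => iv.1) false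
  ivs.foldl (fun out iv =>
    let start := match out.getLast? with
      | none => iv.1
      | some last => max iv.1 (last + 1)
    out ++ PySem.List.pyRange start (iv.2 + 1) 1) []

-- ===== PRECONDITION & SPEC =====
-- one token of pages_str parses as Python's int() (or an int range) without a ValueError
def pvPartOk (part : String) : Bool :=
  let p := PySem.Str.strip part
  if PySem.Str.isIn "-" p then
    let pieces := (PySem.Str.splitMax? p "-" 1).getD []
    (PySem.Int.ofStr? (pieces.getD 0 "")).isSome && (PySem.Int.ofStr? (pieces.getD 1 "")).isSome
  else
    (PySem.Int.ofStr? p).isSome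

-- Pre_ excludes exactly the inputs where Python's int() raises ValueError on some comma token
def Pre_parse_pages_arg (pages_str : String) (total : Int) : Prop :=
  ∀ part ∈ (PySem.Str.split? pages_str ",").getD [], pvPartOk part = true
instance (pages_str : String) (total : Int) : Decidable (Pre_parse_pages_arg pages_str total) := by
  unfold Pre_parse_pages_arg; infer_instance

def pvWitness_parse_pages_arg : String × Int := ("1-3, 7 ,2", 5)

def Spec_parse_pages_arg (pages_str : String) (total : Int) (out : List Int) : Prop := out = parse_pages_arg_alt pages_str total
instance (pages_str : String) (total : Int) (out : List Int) : Decidable (Spec_parse_pages_arg pages_str total out) := by unfold Spec_parse_pages_arg; infer_instance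

-- ===== CLAIM (what is proved, stated in full; the proofs are below) =====
def Claim_equal_parse_pages_arg : Prop := ∀ (pages_str : String) (total : Int), Dom_parse_pages_arg pages_str total → Pre_parse_pages_arg pages_str total → Spec_parse_pages_arg pages_str total (parse_pages_arg pages_str total)


-- ===== LEMMAS AND PROOFS =====

-- the per-part step of port A's parse loop (definitionally the lambda in parse_pages_arg)
def pvStepA : PySem.Set Int → String → PySem.Set Int := fun result part =>
  if PySem.Str.isIn "-" (PySem.Str.strip part) then
    PySem.Set.update result (PySem.List.pyRange
      ((PySem.Int.ofStr? (((PySem.Str.splitMax? (PySem.Str.strip part) "-" 1).getD []).getD 0 "")).getD 0)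
      (((PySem.Int.ofStr? (((PySem.Str.splitMax? (PySem.Str.strip part) "-" 1).getD []).getD 1 "")).getD 0) + 1) 1)
  else
    PySem.Set.add result ((PySem.Int.ofStr? (PySem.Str.strip part)).getD 0)

-- clamping of one parsed (lo, hi) pair to [1, total], as in port B
def pvClamp (total : Int) (lohi : Int × Int) (acc : List (Int × Int)) : List (Int × Int) :=
  if max lohi.1 1 ≤ min lohi.2 total then acc ++ [(max lohi.1 1, min lohi.2 total)] else acc

-- the per-part step of port B's parse loop
def pvStepB (total : Int) : List (Int × Int) → String → List (Int × Int) := fun acc part =>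
  pvClamp total
    (if PySem.Str.isIn "-" (PySem.Str.strip part) then
      ((PySem.Int.ofStr? (((PySem.Str.splitMax? (PySem.Str.strip part) "-" 1).getD []).getD 0 "")).getD 0,
       (PySem.Int.ofStr? (((PySem.Str.splitMax? (PySem.Str.strip part) "-" 1).getD []).getD 1 "")).getD 0)
    else
      ((PySem.Int.ofStr? (PySem.Str.strip part)).getD 0, (PySem.Int.ofStr? (PySem.Str.strip part)).getD 0))
    acc

-- the per-interval step of port B's sweep loop
def pvStepS : List Int → Int × Int → List Int := fun out iv =>
  out ++ PySem.List.pyRange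
    (match out.getLast? with
      | none => iv.1
      | some last => max iv.1 (last + 1)) (iv.2 + 1) 1

theorem pvA_eq (ps : String) (total : Int) :
    parse_pages_arg ps total =
      PySem.List.sorted ((((PySem.Str.split? ps ",").getD []).foldl pvStepA PySem.Set.empty).filter
        (fun p => decide (1 ≤ p ∧ p ≤ total))) (fun x => x) false := rfl

theorem pvB_eq (ps : String) (total : Int) :
    parse_pages_arg_alt ps total =
      (PySem.List.sorted (((PySem.Str.split? ps ",").getD []).foldl (pvStepB total) [])
        (fun iv => iv.1) false).foldl pvStepS [] := rfl

-- one parse step keeps the set/interval correspondence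
theorem pv_parse_step (total : Int) (part : String) (s : List Int) (acc : List (Int × Int))
    (h1 : s.Nodup) (h2 : ∀ iv ∈ acc, 1 ≤ iv.1 ∧ iv.2 ≤ total)
    (h3 : ∀ p : Int, 1 ≤ p → p ≤ total → (p ∈ s ↔ ∃ iv ∈ acc, iv.1 ≤ p ∧ p ≤ iv.2)) :
    (pvStepA s part).Nodup ∧ (∀ iv ∈ pvStepB total acc part, 1 ≤ iv.1 ∧ iv.2 ≤ total) ∧
    (∀ p : Int, 1 ≤ p → p ≤ total →
      (p ∈ pvStepA s part ↔ ∃ iv ∈ pvStepB total acc part, iv.1 ≤ p ∧ p ≤ iv.2)) := by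
  by_cases hc : PySem.Str.isIn "-" (PySem.Str.strip part) = true
  · simp only [pvStepA, pvStepB, if_pos hc]
    set lo := (PySem.Int.ofStr? (((PySem.Str.splitMax? (PySem.Str.strip part) "-" 1).getD []).getD 0 "")).getD 0 with hlo
    set hi := (PySem.Int.ofStr? (((PySem.Str.splitMax? (PySem.Str.strip part) "-" 1).getD []).getD 1 "")).getD 0 with hhi
    refine ⟨PySem.Set.nodup_update s _ h1, ?_, ?_⟩
    · intro iv hiv
      unfold pvClamp at hiv
      split_ifs at hiv with h
      · rcases List.mem_append.mp hiv with h' | h'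
        · exact h2 iv h'
        · simp only [List.mem_singleton] at h'; subst h'; simp
      · exact h2 iv hiv
    · intro p hp1 hp2
      rw [PySem.Set.mem_update, PySem.List.mem_pyRange_one]
      unfold pvClamp
      split_ifs with h
      · constructor
        · rintro (hps | hr)
          · obtain ⟨iv, hiv, hh⟩ := (h3 p hp1 hp2).mp hps
            exact ⟨iv, List.mem_append.mpr (Or.inl hiv), hh⟩
          · refine ⟨(max lo 1, min hi total), List.mem_append.mpr (Or.inr (by simp)), by simp; omega⟩
        · rintro ⟨iv, hiv, hh⟩
          rcases List.mem_append.mp hiv with h' | h'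
          · exact Or.inl ((h3 p hp1 hp2).mpr ⟨iv, h', hh⟩)
          · simp only [List.mem_singleton] at h'; subst h'
            simp only at hh; right; omega
      · constructor
        · rintro (hps | hr)
          · exact (h3 p hp1 hp2).mp hps
          · exfalso; simp only at h; omega
        · intro hex; exact Or.inl ((h3 p hp1 hp2).mpr hex)
  · simp only [pvStepA, pvStepB, if_neg hc]
    set v := (PySem.Int.ofStr? (PySem.Str.strip part)).getD 0 with hv
    refine ⟨PySem.Set.nodup_add s _ h1, ?_, ?_⟩
    · intro iv hiv
      unfold pvClamp at hiv
      split_ifs at hiv with h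
      · rcases List.mem_append.mp hiv with h' | h'
        · exact h2 iv h'
        · simp only [List.mem_singleton] at h'; subst h'; simp
      · exact h2 iv hiv
    · intro p hp1 hp2
      rw [PySem.Set.mem_add]
      unfold pvClamp
      split_ifs with h
      · constructor
        · rintro (hps | hpv)
          · obtain ⟨iv, hiv, hh⟩ := (h3 p hp1 hp2).mp hps
            exact ⟨iv, List.mem_append.mpr (Or.inl hiv), hh⟩
          · refine ⟨(max v 1, min v total), List.mem_append.mpr (Or.inr (by simp)), ?_⟩
            simp only; omega
        · rintro ⟨iv, hiv, hh⟩
          rcases List.mem_append.mp hiv with h' | h'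
          · exact Or.inl ((h3 p hp1 hp2).mpr ⟨iv, h', hh⟩)
          · simp only [List.mem_singleton] at h'; subst h'
            simp only at hh; right; omega
      · constructor
        · rintro (hps | hpv)
          · exact (h3 p hp1 hp2).mp hps
          · exfalso; simp only at h; omega
        · intro hex; exact Or.inl ((h3 p hp1 hp2).mpr hex)

-- the parse loops of A and B stay in step: A's set restricted to [1, total] is the union of B's clamped intervals
theorem pv_parse (total : Int) (parts : List String) : ∀ (s : List Int) (acc : List (Int × Int)),
    s.Nodup →
    (∀ iv ∈ acc, 1 ≤ iv.1 ∧ iv.2 ≤ total) →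
    (∀ p : Int, 1 ≤ p → p ≤ total → (p ∈ s ↔ ∃ iv ∈ acc, iv.1 ≤ p ∧ p ≤ iv.2)) →
    (parts.foldl pvStepA s).Nodup ∧
    (∀ iv ∈ parts.foldl (pvStepB total) acc, 1 ≤ iv.1 ∧ iv.2 ≤ total) ∧
    (∀ p : Int, 1 ≤ p → p ≤ total →
      (p ∈ parts.foldl pvStepA s ↔ ∃ iv ∈ parts.foldl (pvStepB total) acc, iv.1 ≤ p ∧ p ≤ iv.2)) := by
  induction parts with
  | nil => intro s acc h1 h2 h3; exact ⟨h1, h2, h3⟩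
  | cons part rest ih =>
    intro s acc h1 h2 h3
    simp only [List.foldl_cons]
    obtain ⟨g1, g2, g3⟩ := pv_parse_step total part s acc h1 h2 h3
    exact ih (pvStepA s part) (pvStepB total acc part) g1 g2 g3

-- in a strictly increasing list every element is at most the last one
theorem pv_le_getLast : ∀ (l : List Int), l.Pairwise (· < ·) → ∀ m, l.getLast? = some m → ∀ x ∈ l, x ≤ m := by
  intro l
  induction l with
  | nil => simp
  | cons a t ih =>
    intro hpw m hm x hx
    rcases List.pairwise_cons.mp hpw with ⟨ha, ht⟩
    cases t with
    | nil =>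
      simp only [List.getLast?_singleton, Option.some.injEq] at hm
      simp only [List.mem_singleton] at hx
      omega
    | cons b t' =>
      have hm' : (b :: t').getLast? = some m := by
        rw [List.getLast?_cons_cons] at hm; exact hm
      rcases List.mem_cons.mp hx with rfl | hx'
      · have hb : x < b := ha b (by simp)
        have := ih ht m hm' b (by simp)
        omega
      · exact ih ht m hm' x hx'

-- the sweep over intervals sorted by left end emits a strictly increasing enumeration of their union
theorem pv_sweep : ∀ (l : List (Int × Int)) (out : List Int),
    out.Pairwise (· < ·) →
    l.Pairwise (fun a b => a.1 ≤ b.1) →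
    (∀ iv ∈ l, ∀ m, out.getLast? = some m → ∀ p : Int, iv.1 ≤ p → p ≤ m → p ∈ out) →
    (l.foldl pvStepS out).Pairwise (· < ·) ∧
    (∀ p : Int, p ∈ l.foldl pvStepS out ↔ p ∈ out ∨ ∃ iv ∈ l, iv.1 ≤ p ∧ p ≤ iv.2) := by
  intro l
  induction l with
  | nil => intro out h1 _ _; exact ⟨h1, by simp⟩
  | cons iv0 rest ih =>
    intro out h1 h2 h3
    rcases List.pairwise_cons.mp h2 with ⟨hhd, htl⟩
    simp only [List.foldl_cons]
    rcases hlast : out.getLast? with _ | m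
    · -- out is empty: the sweep starts the output at iv0.1
      have hout : out = [] := List.getLast?_eq_none_iff.mp hlast
      subst hout
      have hstep : pvStepS [] iv0 = PySem.List.pyRange iv0.1 (iv0.2 + 1) 1 := rfl
      rw [hstep]
      have hA1 : (PySem.List.pyRange iv0.1 (iv0.2 + 1) 1).Pairwise (· < ·) :=
        PySem.List.pairwise_lt_pyRange_one ..
      have hA3 : ∀ iv ∈ rest, ∀ m', (PySem.List.pyRange iv0.1 (iv0.2 + 1) 1).getLast? = some m' →
          ∀ p : Int, iv.1 ≤ p → p ≤ m' → p ∈ PySem.List.pyRange iv0.1 (iv0.2 + 1) 1 := by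
        intro iv hiv m' hm' p hp1 hp2
        by_cases hr : iv0.1 ≤ iv0.2
        · rw [PySem.List.pyRange_one_succ_right hr, List.getLast?_concat] at hm'
          have hm2 : m' = iv0.2 := by simpa using hm'.symm
          rw [PySem.List.mem_pyRange_one]
          have := hhd iv hiv
          omega
        · rw [PySem.List.pyRange_one_eq_nil (by omega)] at hm'
          simp at hm'
      obtain ⟨g1, g2⟩ := ih (PySem.List.pyRange iv0.1 (iv0.2 + 1) 1) hA1 htl hA3
      refine ⟨g1, fun p => ?_⟩
      rw [g2 p, PySem.List.mem_pyRange_one]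
      simp only [List.not_mem_nil, false_or, List.mem_cons]
      constructor
      · rintro (hr | ⟨iv, hiv, hh⟩)
        · exact ⟨iv0, Or.inl rfl, by omega⟩
        · exact ⟨iv, Or.inr hiv, hh⟩
      · rintro ⟨iv, rfl | hiv, hh⟩
        · exact Or.inl (by omega)
        · exact Or.inr ⟨iv, hiv, hh⟩
    · -- out ends in m: the sweep continues from max iv0.1 (m+1)
      have hstep : pvStepS out iv0 = out ++ PySem.List.pyRange (max iv0.1 (m + 1)) (iv0.2 + 1) 1 := by
        unfold pvStepS; rw [hlast]
      rw [hstep]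
      set start := max iv0.1 (m + 1) with hstart
      set out' := out ++ PySem.List.pyRange start (iv0.2 + 1) 1 with hout'
      have hle : ∀ x ∈ out, x ≤ m := pv_le_getLast out h1 m hlast
      have hA1 : out'.Pairwise (· < ·) := by
        rw [hout']
        refine List.pairwise_append.mpr ⟨h1, PySem.List.pairwise_lt_pyRange_one .., ?_⟩
        intro x hx y hy
        rw [PySem.List.mem_pyRange_one] at hy
        have := hle x hx
        omega
      have hglast : ∀ m', out'.getLast? = some m' →
          (start ≤ iv0.2 ∧ m' = iv0.2) ∨ (iv0.2 < start ∧ m' = m) := by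
        intro m' hm'
        by_cases hr : start ≤ iv0.2
        · rw [hout', PySem.List.pyRange_one_succ_right hr, ← List.append_assoc,
            List.getLast?_concat] at hm'
          left; exact ⟨hr, by simpa using hm'.symm⟩
        · rw [hout', PySem.List.pyRange_one_eq_nil (by omega), List.append_nil, hlast] at hm'
          right; exact ⟨by omega, by simpa using hm'.symm⟩
      have hM : ∀ p : Int, p ∈ out' ↔ p ∈ out ∨ (iv0.1 ≤ p ∧ p ≤ iv0.2) := by
        intro p
        rw [hout', List.mem_append, PySem.List.mem_pyRange_one]
        constructor
        · rintro (hp | hp)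
          · exact Or.inl hp
          · exact Or.inr (by omega)
        · rintro (hp | ⟨hp1, hp2⟩)
          · exact Or.inl hp
          · by_cases hpm : p ≤ m
            · exact Or.inl (h3 iv0 (by simp) m hlast p hp1 hpm)
            · exact Or.inr (by omega)
      have hA3 : ∀ iv ∈ rest, ∀ m', out'.getLast? = some m' →
          ∀ p : Int, iv.1 ≤ p → p ≤ m' → p ∈ out' := by
        intro iv hiv m' hm' p hp1 hp2
        have hfst : iv0.1 ≤ iv.1 := hhd iv hiv
        rcases hglast m' hm' with ⟨hr, hm2⟩ | ⟨hr, hm2⟩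
        · by_cases hpm : p ≤ m
          · exact (hM p).mpr (Or.inl (h3 iv (by simp [hiv]) m hlast p hp1 hpm))
          · exact (hM p).mpr (Or.inr (by omega))
        · exact (hM p).mpr (Or.inl (h3 iv (by simp [hiv]) m hlast p hp1 (by omega)))
      obtain ⟨g1, g2⟩ := ih out' hA1 htl hA3
      refine ⟨g1, fun p => ?_⟩
      rw [g2 p, hM p]
      simp only [List.mem_cons]
      constructor
      · rintro ((hp | hp) | ⟨iv, hiv, hh⟩)
        · exact Or.inl hp
        · exact Or.inr ⟨iv0, Or.inl rfl, hp⟩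
        · exact Or.inr ⟨iv, Or.inr hiv, hh⟩
      · rintro (hp | ⟨iv, rfl | hiv, hh⟩)
        · exact Or.inl (Or.inl hp)
        · exact Or.inl (Or.inr hh)
        · exact Or.inr ⟨iv, hiv, hh⟩

-- ===== VERDICT (by name: the statement is the Claim_ definition above) =====
theorem parse_pages_arg_spec : Claim_equal_parse_pages_arg := by
  intro ps total _hdom _hpre
  unfold Spec_parse_pages_arg
  rw [pvA_eq, pvB_eq]
  set parts := (PySem.Str.split? ps ",").getD [] with hparts
  obtain ⟨hS, hbd, hmem⟩ := pv_parse total parts PySem.Set.empty []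
    List.nodup_nil (by simp) (by simp [PySem.Set.empty])
  set S := parts.foldl pvStepA PySem.Set.empty
  set ACC := parts.foldl (pvStepB total) ([] : List (Int × Int))
  set ivs := PySem.List.sorted ACC (fun iv => iv.1) false with hivs
  have hpw : ivs.Pairwise (fun a b => a.1 ≤ b.1) := PySem.List.sorted_pairwise ..
  obtain ⟨hBpw, hBmem⟩ := pv_sweep ivs [] List.Pairwise.nil hpw (by simp)
  set B := ivs.foldl pvStepS []
  have hivmem : ∀ iv : Int × Int, iv ∈ ivs ↔ iv ∈ ACC := fun iv => PySem.List.mem_sorted ..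
  have hBnodup : B.Nodup := hBpw.imp ne_of_lt
  have hFnodup : (S.filter (fun p => decide (1 ≤ p ∧ p ≤ total))).Nodup := hS.filter _
  have hsame : ∀ p : Int, p ∈ B ↔ p ∈ S.filter (fun p => decide (1 ≤ p ∧ p ≤ total)) := by
    intro p
    rw [List.mem_filter, hBmem]
    simp only [List.mem_nil_iff, false_or, decide_eq_true_eq]
    constructor
    · rintro ⟨iv, hiv, h1, h2⟩
      have hb := hbd iv ((hivmem iv).mp hiv)
      have hp1 : 1 ≤ p := le_trans hb.1 h1
      have hp2 : p ≤ total := le_trans h2 hb.2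
      exact ⟨(hmem p hp1 hp2).mpr ⟨iv, (hivmem iv).mp hiv, h1, h2⟩, hp1, hp2⟩
    · rintro ⟨hpS, hp1, hp2⟩
      obtain ⟨iv, hiv, h1, h2⟩ := (hmem p hp1 hp2).mp hpS
      exact ⟨iv, (hivmem iv).mpr hiv, h1, h2⟩
  have hperm : B.Perm (S.filter (fun p => decide (1 ≤ p ∧ p ≤ total))) :=
    (List.perm_ext_iff_of_nodup hBnodup hFnodup).mpr hsame
  exact PySem.List.sorted_eq_of_perm_of_pairwise_lt _ _ _ hperm hBpw
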